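-- pv_equiv track=rewrite | github.com/Jstuff36/InterviewPractice | AppAcademySkypeInterviewPractice/OrderedVowelWords.py | InOrder
-- ===== SOURCE A (Python) =====
-- def InOrder(word):
-- 	vowels_present = []
-- 	vowels = 'aeiou'
-- 	for let in word:
-- 		if let in vowels:
-- 			vowels_present.append(let)
-- 	if sorted(vowels_present) != vowels_present:
-- 		return(False)
-- 	#for let in range(len(vowels_present)-1):
-- 		#if vowels_present[let] > vowels_present[let+1]:
-- 		#	return(False)
-- 	return(True)
-- ===== SOURCE B (Python) =====
-- def InOrder(word):
--     prev = None
--     for let in word: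
--         if let in 'aeiou':
--             if prev is not None and let < prev:
--                 return False
--             prev = let
--     return True
-- ===== Notes on version B (the rewrite author's own statement) =====
-- stated objective: simpler
-- what changed: Instead of collecting all vowels into a list and comparing it with its sorted copy, B makes a single pass remembering only the previous vowel and returns False early on the first out-of-order vowel.
import Mathlib
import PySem

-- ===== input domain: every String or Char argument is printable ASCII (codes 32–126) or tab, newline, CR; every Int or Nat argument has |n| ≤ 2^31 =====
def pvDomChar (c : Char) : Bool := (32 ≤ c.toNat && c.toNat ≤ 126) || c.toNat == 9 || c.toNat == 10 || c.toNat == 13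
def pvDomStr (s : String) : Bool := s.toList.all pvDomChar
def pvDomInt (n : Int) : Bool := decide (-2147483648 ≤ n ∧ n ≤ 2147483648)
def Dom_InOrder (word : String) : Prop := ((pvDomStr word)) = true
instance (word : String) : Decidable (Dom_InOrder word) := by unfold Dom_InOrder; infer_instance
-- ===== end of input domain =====

-- B changes the algorithm: one pass over the word tracking only the previous vowel, with
-- early exit on the first out-of-order vowel, instead of collecting all vowels and
-- comparing the list with its sorted copy.

-- ===== PORT A =====
-- 'let in vowels' for a single char let is membership of that char in "aeiou" (exact on chars)
def InOrder (word : String) : Bool :=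
  let vowels : List Char := "aeiou".toList
  let vowels_present :=
    word.toList.foldl (fun acc c => if vowels.contains c then acc ++ [c] else acc) []
  if PySem.List.sorted vowels_present (fun x => x) false ≠ vowels_present then false
  else true

-- ===== PORT B =====
def InOrder_alt_go : List Char → Option Char → Bool
  | [], _ => true
  | c :: rest, prev =>
    if ("aeiou".toList).contains c then
      match prev with
      | some p => if c < p then false else InOrder_alt_go rest (some c)
      | none => InOrder_alt_go rest (some c)
    else InOrder_alt_go rest prev

def InOrder_alt (word : String) : Bool :=
  InOrder_alt_go word.toList none

-- ===== PRECONDITION & SPEC =====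
def Spec_InOrder (word : String) (out : Bool) : Prop := out = InOrder_alt word
instance (word : String) (out : Bool) : Decidable (Spec_InOrder word out) := by unfold Spec_InOrder; infer_instance

-- ===== CLAIM (what is proved, stated in full; the proofs are below) =====
def Claim_equal_InOrder : Prop := ∀ (word : String), Dom_InOrder word → Spec_InOrder word (InOrder word)

-- ===== LEMMAS AND PROOFS =====

-- the invariant of B's loop: the previous vowel (if any) prepended to the remaining
-- vowels forms a nondecreasing chain
def withPrev (prev : Option Char) (l : List Char) : List Char :=
  match prev with
  | none => l
  | some p => p :: l


theorem go_eq_chain (l : List Char) : ∀ prev,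
    InOrder_alt_go l prev
      = decide (List.IsChain (· ≤ ·) (withPrev prev (l.filter (fun c => ("aeiou".toList).contains c)))) := by
  induction l with
  | nil =>
    intro prev
    cases prev <;> simp [InOrder_alt_go, withPrev]
  | cons c rest ih =>
    intro prev
    by_cases hv : ("aeiou".toList).contains c = true
    · cases prev with
      | none =>
        show InOrder_alt_go (c :: rest) none = _
        rw [InOrder_alt_go, if_pos hv, List.filter_cons_of_pos hv, ih (some c)]
        rfl
      | some p =>
        rw [InOrder_alt_go, if_pos hv, List.filter_cons_of_pos hv]
        by_cases hlt : c < p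
        · rw [if_pos hlt]
          have h' : ¬ List.IsChain (· ≤ ·)
              (withPrev (some p) (c :: rest.filter (fun c => ("aeiou".toList).contains c))) := by
            show ¬ List.IsChain (· ≤ ·) (p :: c :: rest.filter (fun c => ("aeiou".toList).contains c))
            rw [List.isChain_cons_cons]
            exact fun h => absurd h.1 (not_le.mpr hlt)
          exact (decide_eq_false h').symm
        · rw [if_neg hlt, ih (some c)]
          apply (decide_eq_decide).mpr
          show List.IsChain (· ≤ ·) (c :: _) ↔ List.IsChain (· ≤ ·) (p :: c :: _)
          rw [List.isChain_cons_cons]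
          exact ⟨fun h => ⟨not_lt.mp hlt, h⟩, fun h => h.2⟩
    · cases prev <;>
        rw [InOrder_alt_go, if_neg hv, List.filter_cons_of_neg (by simpa using hv), ih]

theorem sorted_eq_iff_chain (l : List Char) :
    (PySem.List.sorted l (fun x => x) false = l) ↔ List.IsChain (· ≤ ·) l := by
  rw [List.isChain_iff_pairwise]
  constructor
  · intro h
    have := PySem.List.sorted_pairwise l (fun x => x)
    rw [h] at this
    exact this
  · intro h
    exact PySem.List.sorted_eq_self_of_pairwise l (fun x => x) h

theorem InOrder_spec : Claim_equal_InOrder := by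
  intro word _
  show InOrder word = InOrder_alt word
  have hfilter :
      word.toList.foldl (fun acc c => if ("aeiou".toList).contains c then acc ++ [c] else acc) []
        = word.toList.filter (fun c => ("aeiou".toList).contains c) := by
    rw [PySem.List.foldl_append_if, List.nil_append, List.map_id']
  show (if PySem.List.sorted
          (word.toList.foldl (fun acc c => if ("aeiou".toList).contains c then acc ++ [c] else acc) [])
          (fun x => x) false
        ≠ word.toList.foldl (fun acc c => if ("aeiou".toList).contains c then acc ++ [c] else acc) []
      then false else true)
    = InOrder_alt_go word.toList none
  rw [hfilter, go_eq_chain]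
  by_cases hs : PySem.List.sorted
      (word.toList.filter (fun c => ("aeiou".toList).contains c)) (fun x => x) false
      = word.toList.filter (fun c => ("aeiou".toList).contains c)
  · rw [if_neg (fun h => h hs)]
    have h' : List.IsChain (· ≤ ·)
        (withPrev none (word.toList.filter (fun c => ("aeiou".toList).contains c))) := by
      exact (sorted_eq_iff_chain _).mp hs
    exact (decide_eq_true h').symm
  · rw [if_pos hs]
    have h' : ¬ List.IsChain (· ≤ ·)
        (withPrev none (word.toList.filter (fun c => ("aeiou".toList).contains c))) := by
      exact fun h => hs ((sorted_eq_iff_chain _).mpr h)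
    exact (decide_eq_false h').symm
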